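-- pv_equiv track=rewrite | github.com/vkapur2202/cryptography_software_tool | vigenere.py | key_function
-- ===== SOURCE A (Python) =====
-- def key_function(key, phrase):
--     if len(key) == len(phrase):
--         return key
--
--     else:
--         phrase_diff = len(phrase) - len(key)
--         for i in range(phrase_diff):
--             key.append(key[i%len(key)])
--
--     return key
-- ===== SOURCE B (Python) =====
-- def key_function(key, phrase):
--     L, P = len(key), len(phrase)
--     if P <= L:
--         return key
--     orig = list(key)
--     reps, rem = divmod(P - L, L)
--     key.extend(orig * reps + orig[:rem])
--     return key
-- ===== Notes on version B (the rewrite author's own statement) =====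
-- stated objective: alternative
-- what changed: Replaces A's element-by-element append loop (one indexed access per missing character, with an index mod the growing list) with a bulk cyclic extension: divmod gives the number of whole key repetitions and the remainder, and one extend of orig*reps + orig[:rem] builds the whole extension at once.
import Mathlib
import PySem

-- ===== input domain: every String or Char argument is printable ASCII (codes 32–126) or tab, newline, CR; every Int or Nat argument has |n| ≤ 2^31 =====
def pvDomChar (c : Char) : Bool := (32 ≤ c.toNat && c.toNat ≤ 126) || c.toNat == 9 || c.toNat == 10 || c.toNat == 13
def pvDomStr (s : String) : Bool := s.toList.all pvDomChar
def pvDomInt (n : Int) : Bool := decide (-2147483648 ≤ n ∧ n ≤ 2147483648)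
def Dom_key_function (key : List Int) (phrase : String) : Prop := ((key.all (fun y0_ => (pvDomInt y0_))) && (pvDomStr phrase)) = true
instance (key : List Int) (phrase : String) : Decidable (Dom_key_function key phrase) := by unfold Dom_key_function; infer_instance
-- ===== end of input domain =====

-- B builds the cyclic extension in bulk (list repetition + a prefix slice) instead of A's
-- element-by-element append loop; equivalence is about the return value (the Python versions
-- both also mutate `key` in place and agree on that mutation).

-- ===== PORT A =====
def key_function (key : List Int) (phrase : String) : List Int :=
  if (key.length : Int) = PySem.Str.len phrase then key
  else
    let phrase_diff : Int := PySem.Str.len phrase - (key.length : Int)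
    (PySem.List.pyRange 0 phrase_diff 1).foldl
      (fun k i => k ++ [PySem.List.pyGetD k (PySem.Int.mod i (k.length : Int)) 0]) key

-- ===== PORT B =====
def key_function_alt (key : List Int) (phrase : String) : List Int :=
  let L : Int := key.length
  let P : Int := PySem.Str.len phrase
  if P ≤ L then key
  else
    let orig := key
    let reps := PySem.Int.floordiv (P - L) L
    let rem := PySem.Int.mod (P - L) L
    key ++ ((List.replicate reps.toNat orig).flatten ++ orig.take rem.toNat)

-- ===== PRECONDITION & SPEC =====
-- Pre_ excludes only the inputs where A raises ZeroDivisionError (empty key, non-empty phrase);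
-- B raises there too.
def Pre_key_function (key : List Int) (phrase : String) : Prop :=
  key ≠ [] ∨ phrase = ""
instance (key : List Int) (phrase : String) : Decidable (Pre_key_function key phrase) := by
  unfold Pre_key_function; infer_instance

def pvWitness_key_function : List Int × String := ([1, 2], "abcde")

def Spec_key_function (key : List Int) (phrase : String) (out : List Int) : Prop := out = key_function_alt key phrase
instance (key : List Int) (phrase : String) (out : List Int) : Decidable (Spec_key_function key phrase out) := by unfold Spec_key_function; infer_instance

-- ===== CLAIM (what is proved, stated in full; the proofs are below) =====
def Claim_equal_key_function : Prop := ∀ (key : List Int) (phrase : String), Dom_key_function key phrase → Pre_key_function key phrase → Spec_key_function key phrase (key_function key phrase)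

-- ===== LEMMAS AND PROOFS =====

-- prefix of a list as a map over range
theorem take_eq_map_range (key : List Int) (m : Nat) (hm : m ≤ key.length) :
    key.take m = (List.range m).map (fun i => key.getD i 0) := by
  induction m with
  | zero => simp
  | succ m ih =>
    rw [List.range_succ, List.map_append, ← ih (by omega), List.take_add_one]
    have h : m < key.length := by omega
    simp [List.getD_eq_getElem?_getD, List.getElem?_eq_getElem h]

-- A's loop: appending key[i % len] one element at a time yields the cyclic map
theorem loopA_eq_map (key : List Int) (hk : key ≠ []) (n : Nat) :
    (PySem.List.pyRange 0 (n : Int) 1).foldl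
      (fun k i => k ++ [PySem.List.pyGetD k (PySem.Int.mod i (k.length : Int)) 0]) key
    = key ++ (List.range n).map (fun i => key.getD (i % key.length) 0) := by
  have hL : 0 < key.length := List.length_pos_iff.mpr hk
  induction n with
  | zero => simp [PySem.List.pyRange]
  | succ n ih =>
    have : ((n : Int) + 1) = ((n + 1 : Nat) : Int) := by push_cast; ring
    rw [← this, PySem.List.pyRange_one_succ_right (by omega), List.foldl_append, ih]
    have hlen : (key ++ (List.range n).map (fun i => key.getD (i % key.length) 0)).length
        = key.length + n := by simp
    have hmod : PySem.Int.mod (n : Int)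
        (((key ++ (List.range n).map (fun i => key.getD (i % key.length) 0)).length : Nat) : Int)
        = ((n : Nat) : Int) := by
      rw [hlen, PySem.Int.mod_natCast]
      congr 1
      exact Nat.mod_eq_of_lt (by omega)
    simp only [List.foldl_cons, List.foldl_nil, hmod, PySem.List.pyGetD_natCast]
    rw [List.range_succ, List.map_append, ← List.append_assoc]
    congr 2
    by_cases h : n < key.length
    · simp [List.getD_eq_getElem?_getD, List.getElem?_append_left h, Nat.mod_eq_of_lt h]
    · rw [Nat.not_lt] at h
      have h2 : n - key.length < n := by omega
      simp only [List.getD_eq_getElem?_getD]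
      rw [List.getElem?_append_right h, List.getElem?_map, List.getElem?_range h2]
      simp [Nat.mod_eq_sub_mod h]

-- B's bulk extension equals the same cyclic map
theorem bulk_eq_map (key : List Int) (hk : key ≠ []) (r m : Nat) (hm : m ≤ key.length) :
    (List.replicate r key).flatten ++ key.take m
    = (List.range (r * key.length + m)).map (fun i => key.getD (i % key.length) 0) := by
  have hL : 0 < key.length := List.length_pos_iff.mpr hk
  induction r with
  | zero =>
    simp only [List.replicate, List.flatten_nil, List.nil_append, Nat.zero_mul, Nat.zero_add]
    rw [take_eq_map_range key m hm]
    exact List.map_congr_left (fun i hi => by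
      have : i < m := List.mem_range.mp hi
      rw [Nat.mod_eq_of_lt (by omega)])
  | succ r ih =>
    have harith : (r + 1) * key.length + m = key.length + (r * key.length + m) := by ring
    rw [harith, List.range_add, List.map_append, List.replicate_succ, List.flatten_cons,
      List.append_assoc, ih]
    congr 1
    · have h1 : (List.range key.length).map (fun i => key.getD (i % key.length) 0)
          = (List.range key.length).map (fun i => key.getD i 0) :=
        List.map_congr_left (fun i hi => by rw [Nat.mod_eq_of_lt (List.mem_range.mp hi)])
      rw [h1, ← take_eq_map_range key key.length le_rfl]
      simp
    · rw [List.map_map]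
      exact List.map_congr_left (fun i _ => by
        simp [Nat.add_mod_left])

-- ===== VERDICT (by name: the statement is the Claim_ definition above) =====
theorem key_function_spec : Claim_equal_key_function := by
  intro key phrase _ hpre
  unfold Spec_key_function key_function key_function_alt
  simp only [PySem.Str.len_eq]
  set L := key.length with hLdef
  set P := phrase.toList.length with hPdef
  rcases Nat.lt_trichotomy P L with hlt | heq | hgt
  · -- phrase shorter: A's range is empty, B returns key
    rw [if_neg (by omega), if_pos (by exact_mod_cast Nat.le_of_lt hlt)]
    have : ((P : Int) - (L : Int)) ≤ 0 := by omega
    have hempty : PySem.List.pyRange 0 ((P : Int) - (L : Int)) 1 = [] := by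
      simp [PySem.List.pyRange]; omega
    rw [hempty]; rfl
  · rw [if_pos (by omega), if_pos (by omega)]
  · -- phrase longer: key must be non-empty (Pre_)
    have hk : key ≠ [] := by
      rcases hpre with h | h
      · exact h
      · exfalso; rw [h] at hPdef; simp at hPdef; omega
    have hL : 0 < L := by
      have := List.length_pos_iff.mpr hk; omega
    rw [if_neg (by omega), if_neg (by omega)]
    have hdiff : (P : Int) - (L : Int) = ((P - L : Nat) : Int) := by omega
    rw [hdiff, loopA_eq_map key hk (P - L)]
    congr 1
    rw [PySem.Int.floordiv_natCast, PySem.Int.mod_natCast, Int.toNat_natCast, Int.toNat_natCast]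
    rw [bulk_eq_map key hk ((P - L) / L) ((P - L) % L) (Nat.le_of_lt (Nat.mod_lt _ hL))]
    have hx : (P - L) / L * key.length + (P - L) % L = P - L := by
      rw [← hLdef, Nat.mul_comm]; exact Nat.div_add_mod _ _
    rw [hx]
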